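-- pv_equiv track=rewrite | github.com/eyadhmd1-blip/Waseet | fix_subcomponents3.py | find_body_brace
-- ===== SOURCE A (Python) =====
-- def find_body_brace(content, fn_start):
--     """Find the opening { of the function body, skipping parameter braces."""
--     i = fn_start
--     # Skip the 'function Name' part
--     while i < len(content) and content[i] != '(':
--         i += 1
--     if i >= len(content):
--         return -1
--
--     # Track paren depth to skip parameter list
--     paren_depth = 0
--     while i < len(content):
--         c = content[i]
--         if c == '(':
--             paren_depth += 1
--         elif c == ')':
--             paren_depth -= 1
--             if paren_depth == 0:
--                 i += 1
--                 break
--         i += 1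
--
--     # Now skip to the opening { of the body
--     # There might be a return type annotation like ': ReturnType {'
--     while i < len(content) and content[i] not in ('{', '\n\n'):
--         if content[i] == '{':
--             break
--         i += 1
--
--     if i >= len(content) or content[i] != '{':
--         return -1
--     return i
-- ===== SOURCE B (Python) =====
-- def find_body_brace(content, fn_start):
--     """Find the opening { of the function body, skipping parameter braces.
--
--     Instead of examining every character, jump between the interesting
--     punctuation with str.find: locate the first '(', then repeatedly find the
--     next '(' and ')' to keep the paren balance until the parameter list
--     closes, then find the body's '{' directly."""
--     i = content.find('(', fn_start)
--     if i == -1: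
--         return -1
--     depth, i = 1, i + 1
--     while depth:
--         o = content.find('(', i)
--         c = content.find(')', i)
--         if c == -1:
--             return -1
--         if o != -1 and o < c:
--             depth, i = depth + 1, o + 1
--         else:
--             depth, i = depth - 1, c + 1
--     return content.find('{', i)
-- ===== Notes on version B (the rewrite author's own statement) =====
-- stated objective: faster
-- what changed: A's character-by-character three-loop scan is replaced by str.find jumps: find the first '(', then repeatedly find the next '(' and ')' to balance the parameter list, then find the body '{' with one final find, so the Python-level loop only visits punctuation positions (C-level scanning in between).
-- outside the precondition, e.g. on find_body_brace('f(x){a', -6): A returns -2, B returns 4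
import Mathlib
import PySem

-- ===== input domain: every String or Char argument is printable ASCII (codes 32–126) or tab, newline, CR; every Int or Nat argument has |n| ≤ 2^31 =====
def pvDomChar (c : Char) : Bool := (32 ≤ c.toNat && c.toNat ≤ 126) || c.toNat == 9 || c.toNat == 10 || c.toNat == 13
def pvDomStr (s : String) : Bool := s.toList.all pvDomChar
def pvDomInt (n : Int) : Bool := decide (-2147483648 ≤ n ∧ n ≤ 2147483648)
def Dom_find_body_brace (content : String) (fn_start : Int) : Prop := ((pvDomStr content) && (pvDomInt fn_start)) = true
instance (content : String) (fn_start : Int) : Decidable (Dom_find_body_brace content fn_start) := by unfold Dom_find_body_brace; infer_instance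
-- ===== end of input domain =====

-- B replaces A's character-by-character scan by str.find jumps between the
-- punctuation characters ( ) { — measurably faster by a constant factor
-- (C-level scanning between punctuation); equivalence is about the return value.

-- content[i] (Python semantics); the default ' ' is unreachable inside Pre_
-- (0 ≤ fn_start and every access is guarded by i < len).
def pvGet (content : String) (i : Int) : Char := PySem.List.pyGetD content.toList i ' '

-- len(content)
def pvN (content : String) : Int := (content.toList.length : Int)

-- ===== PORT A =====
-- while i < len(content) and content[i] != '(': i += 1
def fbbL1 (content : String) (i : Int) : Nat → Int
  | 0 => i
  | f + 1 =>
    if i < pvN content ∧ ¬ (pvGet content i = '(') then fbbL1 content (i + 1) f else i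

-- second while: track paren depth; the break returns i+1
def fbbL2 (content : String) (i : Int) (paren_depth : Int) : Nat → Int
  | 0 => i
  | f + 1 =>
    if i < pvN content then
      let c := pvGet content i
      if c = '(' then fbbL2 content (i + 1) (paren_depth + 1) f
      else if c = ')' then
        if paren_depth - 1 = 0 then i + 1 else fbbL2 content (i + 1) (paren_depth - 1) f
      else fbbL2 content (i + 1) paren_depth f
    else i

-- third while: Python compares the 1-char string content[i] with '{' and '\n\n';
-- ported on lists of chars: [c] = ['{'] resp. [c] = ['\n','\n'] (the latter never holds)
def fbbL3 (content : String) (i : Int) : Nat → Int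
  | 0 => i
  | f + 1 =>
    if i < pvN content ∧
        ¬ ([pvGet content i] = ['{'] ∨ [pvGet content i] = ['\n', '\n']) then
      if [pvGet content i] = ['{'] then i else fbbL3 content (i + 1) f
    else i

def find_body_brace (content : String) (fn_start : Int) : Int :=
  let n : Int := pvN content
  let i1 := fbbL1 content fn_start (n - fn_start).toNat
  if i1 ≥ n then -1
  else
    let i2 := fbbL2 content i1 0 (n - i1).toNat
    let i3 := fbbL3 content i2 (n - i2).toNat
    if i3 ≥ n ∨ ¬ (pvGet content i3 = '{') then -1 else i3

-- ===== PORT B =====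
-- content.find(ch, i)  (Python str.find with a start argument)
def fbbFind (content : String) (ch : Char) (i : Int) : Int :=
  PySem.Chars.findFrom content.toList [ch] i none

-- while depth: jump to the next '(' / ')' with find (fuel = remaining indices;
-- when fuel runs out i is past the end, where Python's find(')', i) is -1 too)
def fbbClose (content : String) (i depth : Int) : Nat → Int
  | 0 => -1
  | f + 1 =>
    let o := fbbFind content '(' i
    let c := fbbFind content ')' i
    if c = -1 then -1
    else if o ≠ -1 ∧ o < c then fbbClose content (o + 1) (depth + 1) f
    else if depth - 1 = 0 then c + 1
    else fbbClose content (c + 1) (depth - 1) f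

def find_body_brace_alt (content : String) (fn_start : Int) : Int :=
  let p := fbbFind content '(' fn_start
  if p = -1 then -1
  else
    let j := fbbClose content (p + 1) 1 (pvN content - (p + 1)).toNat
    if j = -1 then -1 else fbbFind content '{' j

-- ===== PRECONDITION & SPEC =====
-- Pre_ excludes negative fn_start, a corner no caller specifies: there A reads each
-- content[i] with Python's negative indexing (wrapping from the end, possibly returning
-- a negative index) while B's str.find clamps its start slice-style; both readings are
-- defensible for an offset that is not a position in the string. (A raises IndexError
-- only for fn_start < -len(content), also excluded.)
def Pre_find_body_brace (content : String) (fn_start : Int) : Prop :=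
  0 ≤ fn_start
instance (content : String) (fn_start : Int) : Decidable (Pre_find_body_brace content fn_start) := by
  unfold Pre_find_body_brace; infer_instance

def pvWitness_find_body_brace : String × Int := ("function f(x) {", 0)

def Spec_find_body_brace (content : String) (fn_start : Int) (out : Int) : Prop := out = find_body_brace_alt content fn_start
instance (content : String) (fn_start : Int) (out : Int) : Decidable (Spec_find_body_brace content fn_start out) := by unfold Spec_find_body_brace; infer_instance

-- ===== CLAIM (what is proved, stated in full; the proofs are below) =====
def Claim_equal_find_body_brace : Prop := ∀ (content : String) (fn_start : Int), Dom_find_body_brace content fn_start → Pre_find_body_brace content fn_start → Spec_find_body_brace content fn_start (find_body_brace content fn_start)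

-- ===== LEMMAS AND PROOFS =====

-- single-character prefixes/membership of a drop, used to read PySem's find lemmas
lemma sing_prefix_drop (L : List Char) (ch : Char) (j : Nat) (h : j < L.length) :
    [ch] <+: L.drop j ↔ L[j] = ch := by
  rw [List.drop_eq_getElem_cons h]
  constructor
  · rintro ⟨t, ht⟩
    simpa [List.getElem?_eq_getElem h, eq_comm] using congrArg (·.head?) ht
  · intro hc
    exact ⟨_, by rw [hc]; rfl⟩

lemma not_sing_prefix_drop (L : List Char) (ch : Char) (j : Nat) (h : L.length ≤ j) :
    ¬ ([ch] <+: L.drop j) := by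
  intro hp
  have := hp.length_le
  simp [List.length_drop] at this; omega

lemma mem_drop_iff_getElem (L : List Char) (ch : Char) (j : Nat) :
    ch ∈ L.drop j ↔ ∃ k, j ≤ k ∧ ∃ h : k < L.length, L[k] = ch := by
  rw [List.mem_iff_getElem]
  constructor
  · rintro ⟨i, hi, hget⟩
    refine ⟨j + i, by omega, ⟨by simp at hi; omega, ?_⟩⟩
    rw [← List.getElem_drop] <;> simp at hi ⊢ <;> omega
  · rintro ⟨k, hjk, hk, hget⟩
    refine ⟨k - j, by simp; omega, ?_⟩
    rw [List.getElem_drop]; simpa [Nat.add_sub_cancel' hjk]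

-- pvGet agrees with list indexing in range
lemma pvGet_eq (content : String) (j : Int) (h0 : 0 ≤ j) (h1 : j < pvN content) :
    pvGet content j = content.toList[j.toNat]'(by unfold pvN at h1; omega) := by
  exact PySem.List.pyGetD_eq_getElem _ _ h0 (by simpa [pvN] using h1)

-- find past the end is -1
lemma fbbFind_out (content : String) (ch : Char) (i : Int) (h : pvN content < i) :
    fbbFind content ch i = -1 := by
  have h' : ((content.toList.length : Int)) < i := by unfold pvN at h; exact h
  simp only [fbbFind, PySem.Chars.findFrom]
  split_ifs <;> omega

-- characterization of content.find(ch, i) for 0 ≤ i ≤ len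
lemma fbbFind_neg_one (content : String) (ch : Char) (i : Int)
    (h0 : 0 ≤ i) (h1 : i ≤ pvN content) (h : fbbFind content ch i = -1) :
    ∀ j : Int, i ≤ j → j < pvN content → pvGet content j ≠ ch := by
  intro j hij hjn
  have hk : i = ((i.toNat : Nat) : Int) := by omega
  have hkl : i.toNat ≤ content.toList.length := by unfold pvN at h1; omega
  rw [hk] at h
  unfold fbbFind at h
  rw [PySem.Chars.findFrom_natCast_eq_neg_one_iff _ _ _ hkl] at h
  rw [List.singleton_infix_iff, mem_drop_iff_getElem] at h
  intro hc
  exact h ⟨j.toNat, by omega, by unfold pvN at hjn; omega,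
    by rw [pvGet_eq content j (by omega) hjn] at hc; exact hc⟩

lemma fbbFind_found (content : String) (ch : Char) (i : Int)
    (h0 : 0 ≤ i) (h1 : i ≤ pvN content) (h : fbbFind content ch i ≠ -1) :
    i ≤ fbbFind content ch i ∧ fbbFind content ch i < pvN content ∧
      pvGet content (fbbFind content ch i) = ch ∧
      ∀ j : Int, i ≤ j → j < fbbFind content ch i → pvGet content j ≠ ch := by
  have hk : i = ((i.toNat : Nat) : Int) := by omega
  have hkl : i.toNat ≤ content.toList.length := by unfold pvN at h1; omega
  rw [hk] at h ⊢
  unfold fbbFind at h ⊢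
  obtain ⟨hle, hpre, hmin⟩ := PySem.Chars.findFrom_natCast_spec content.toList [ch] i.toNat hkl h
  set p := PySem.Chars.findFrom content.toList [ch] (i.toNat : Int) none with hp
  have hp0 : 0 ≤ p := le_trans (by omega) hle
  have hplen : p.toNat < content.toList.length := by
    by_contra hc
    exact not_sing_prefix_drop content.toList ch p.toNat (by omega) hpre
  have hpn : p < pvN content := by unfold pvN; omega
  refine ⟨hle, hpn, ?_, ?_⟩
  · rw [pvGet_eq content p hp0 hpn]
    exact (sing_prefix_drop _ _ _ hplen).mp hpre
  · intro j hij hjp hc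
    have hjn : j < pvN content := lt_trans hjp hpn
    refine hmin j.toNat (by omega) (by omega) ?_
    rw [sing_prefix_drop _ _ _ (by unfold pvN at hjn; omega)]
    rw [pvGet_eq content j (by omega) hjn] at hc
    exact hc

-- ---- phase 1: fbbL1 vs find '(' ----
lemma fbbL1_none (content : String) :
    ∀ (f : Nat) (i : Int), f = (pvN content - i).toNat → i ≤ pvN content →
      (∀ j : Int, i ≤ j → j < pvN content → pvGet content j ≠ '(') →
      fbbL1 content i f = pvN content := by
  intro f
  induction f with
  | zero => intro i hf hi _; simp only [fbbL1]; omega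
  | succ f ih =>
    intro i hf hi hno
    have hin : i < pvN content := by omega
    rw [fbbL1, if_pos ⟨hin, hno i le_rfl hin⟩]
    exact ih (i + 1) (by omega) (by omega) (fun j hj => hno j (by omega))

lemma fbbL1_found (content : String) :
    ∀ (f : Nat) (i p : Int), f = (pvN content - i).toNat →
      i ≤ p → p < pvN content → pvGet content p = '(' →
      (∀ j : Int, i ≤ j → j < p → pvGet content j ≠ '(') →
      fbbL1 content i f = p := by
  intro f
  induction f with
  | zero => intro i p hf hip hpn _ _; omega
  | succ f ih =>
    intro i p hf hip hpn hget hno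
    by_cases hip' : i = p
    · subst hip'; rw [fbbL1, if_neg (by simp [hget])]
    · rw [fbbL1, if_pos ⟨by omega, hno i le_rfl (by omega)⟩]
      exact ih (i + 1) p (by omega) (by omega) hpn hget (fun j hj hj' => hno j (by omega) hj')

-- ---- phase 2: fbbL2 vs the find-jump loop ----
lemma fbbL2_skip (content : String) :
    ∀ (g : Nat) (i m d : Int), g = (m - i).toNat → i ≤ m → m ≤ pvN content →
      (∀ j : Int, i ≤ j → j < m → pvGet content j ≠ '(' ∧ pvGet content j ≠ ')') →
      fbbL2 content i d ((pvN content - i).toNat) = fbbL2 content m d ((pvN content - m).toNat) := by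
  intro g
  induction g with
  | zero =>
    intro i m d hg him _ _
    obtain rfl : i = m := by omega
    rfl
  | succ g ih =>
    intro i m d hg him hmn hno
    have hin : i < pvN content := by omega
    obtain ⟨hno1, hno2⟩ := hno i le_rfl (by omega)
    rw [show (pvN content - i).toNat = (pvN content - (i+1)).toNat + 1 by omega]
    rw [fbbL2, if_pos hin]
    simp only [hno1, hno2, if_false]
    exact ih (i + 1) m d (by omega) (by omega) hmn (fun j hj hj' => hno j (by omega) hj')

lemma fbbL2_noClose (content : String) :
    ∀ (f : Nat) (i d : Int), f = (pvN content - i).toNat → i ≤ pvN content →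
      (∀ j : Int, i ≤ j → j < pvN content → pvGet content j ≠ ')') →
      fbbL2 content i d f = pvN content := by
  intro f
  induction f with
  | zero => intro i d hf hi _; simp only [fbbL2]; omega
  | succ f ih =>
    intro i d hf hi hno
    have hin : i < pvN content := by omega
    rw [fbbL2, if_pos hin]
    by_cases ho : pvGet content i = '('
    · simp only [ho, if_pos]
      exact ih (i + 1) (d + 1) (by omega) (by omega) (fun j hj => hno j (by omega))
    · simp only [ho, hno i le_rfl hin, if_false]
      exact ih (i + 1) d (by omega) (by omega) (fun j hj => hno j (by omega))

lemma fbbL2_step_open (content : String) (i d : Int) (hin : i < pvN content)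
    (h : pvGet content i = '(') :
    fbbL2 content i d ((pvN content - i).toNat)
      = fbbL2 content (i + 1) (d + 1) ((pvN content - (i + 1)).toNat) := by
  rw [show (pvN content - i).toNat = (pvN content - (i+1)).toNat + 1 by omega]
  rw [fbbL2, if_pos hin]
  simp [h]

-- the main bridge: the find-jump loop computes A's paren-skipping loop
lemma fbbClose_bridge (content : String) :
    ∀ (f : Nat) (i d : Int), 0 ≤ i → i ≤ pvN content → (pvN content - i).toNat ≤ f → 1 ≤ d →
      (fbbClose content i d f = -1 → fbbL2 content i d ((pvN content - i).toNat) = pvN content) ∧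
      (fbbClose content i d f ≠ -1 →
        0 ≤ fbbClose content i d f ∧ fbbClose content i d f ≤ pvN content ∧
        fbbL2 content i d ((pvN content - i).toNat) = fbbClose content i d f) := by
  intro f
  induction f with
  | zero =>
    intro i d h0 hn hf _
    have : i = pvN content := by omega
    subst this
    refine ⟨fun _ => ?_, fun h => absurd rfl h⟩
    rw [show (pvN content - pvN content).toNat = 0 by omega]
    simp [fbbL2]
  | succ f ih =>
    intro i d h0 hn hf hd
    rw [fbbClose]
    by_cases hc : fbbFind content ')' i = -1
    · have hno := fbbFind_neg_one content ')' i h0 hn hc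
      simp only [hc, if_pos]
      exact ⟨fun _ => fbbL2_noClose content _ i d rfl hn hno, fun h => absurd rfl h⟩
    · obtain ⟨hic, hcn, hcget, hcmin⟩ := fbbFind_found content ')' i h0 hn hc
      set cc := fbbFind content ')' i with hcc
      rw [if_neg hc]
      by_cases hoc : fbbFind content '(' i ≠ -1 ∧ fbbFind content '(' i < cc
      · obtain ⟨ho, hoo⟩ := hoc
        obtain ⟨hio, hon, hoget, homin⟩ := fbbFind_found content '(' i h0 hn ho
        set o := fbbFind content '(' i with ho'
        rw [if_pos ⟨ho, hoo⟩]
        have hskip : fbbL2 content i d ((pvN content - i).toNat)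
            = fbbL2 content o d ((pvN content - o).toNat) :=
          fbbL2_skip content (o - i).toNat i o d rfl hio (le_of_lt hon)
            (fun j hj hj' => ⟨homin j hj hj', hcmin j hj (by omega)⟩)
        have hstep := fbbL2_step_open content o d hon hoget
        have := ih (o + 1) (d + 1) (by omega) (by omega) (by omega) (by omega)
        constructor
        · intro h; rw [hskip, hstep]; exact this.1 h
        · intro h
          obtain ⟨ha, hb, hcq⟩ := this.2 h
          exact ⟨ha, hb, by rw [hskip, hstep]; exact hcq⟩
      · rw [if_neg hoc]
        have hnoopen : ∀ j : Int, i ≤ j → j < cc → pvGet content j ≠ '(' := by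
          intro j hij hjc
          by_cases ho : fbbFind content '(' i = -1
          · exact fbbFind_neg_one content '(' i h0 hn ho j hij (lt_trans hjc hcn)
          · obtain ⟨hio, hon, hoget, homin⟩ := fbbFind_found content '(' i h0 hn ho
            have : cc ≤ fbbFind content '(' i := by
              rcases not_and_or.mp hoc with h' | h'
              · exact absurd ho (not_not.mpr (not_not.mp h'))
              · omega
            exact homin j hij (by omega)
        have hskip : fbbL2 content i d ((pvN content - i).toNat)
            = fbbL2 content cc d ((pvN content - cc).toNat) :=
          fbbL2_skip content (cc - i).toNat i cc d rfl hic (le_of_lt hcn)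
            (fun j hj hj' => ⟨hnoopen j hj hj', hcmin j hj hj'⟩)
        have hccfuel : (pvN content - cc).toNat = (pvN content - (cc + 1)).toNat + 1 := by omega
        by_cases hd1 : d - 1 = 0
        · rw [if_pos hd1]
          refine ⟨fun h => absurd h (by omega), fun _ => ⟨by omega, by omega, ?_⟩⟩
          rw [hskip, hccfuel, fbbL2, if_pos hcn]
          simp [hcget, hd1]
        · rw [if_neg hd1]
          have hstep : fbbL2 content cc d ((pvN content - cc).toNat)
              = fbbL2 content (cc + 1) (d - 1) ((pvN content - (cc + 1)).toNat) := by
            rw [hccfuel, fbbL2, if_pos hcn]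
            simp [hcget, hd1]
          have := ih (cc + 1) (d - 1) (by omega) (by omega) (by omega) (by omega)
          constructor
          · intro h; rw [hskip, hstep]; exact this.1 h
          · intro h
            obtain ⟨ha, hb, hcq⟩ := this.2 h
            exact ⟨ha, hb, by rw [hskip, hstep]; exact hcq⟩

-- ---- phase 3: fbbL3 vs find '{' ----
lemma fbbL3_none (content : String) :
    ∀ (f : Nat) (i : Int), f = (pvN content - i).toNat → i ≤ pvN content →
      (∀ j : Int, i ≤ j → j < pvN content → pvGet content j ≠ '{') →
      fbbL3 content i f = pvN content := by
  intro f
  induction f with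
  | zero => intro i hf hi _; simp only [fbbL3]; omega
  | succ f ih =>
    intro i hf hi hno
    have hin : i < pvN content := by omega
    have hne := hno i le_rfl hin
    rw [fbbL3, if_pos ⟨hin, by simp [hne]⟩, if_neg (by simp [hne])]
    exact ih (i + 1) (by omega) (by omega) (fun j hj => hno j (by omega))

lemma fbbL3_found (content : String) :
    ∀ (f : Nat) (i p : Int), f = (pvN content - i).toNat →
      i ≤ p → p < pvN content → pvGet content p = '{' →
      (∀ j : Int, i ≤ j → j < p → pvGet content j ≠ '{') →
      fbbL3 content i f = p := by
  intro f
  induction f with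
  | zero => intro i p hf hip hpn _ _; omega
  | succ f ih =>
    intro i p hf hip hpn hget hno
    by_cases hip' : i = p
    · subst hip'; rw [fbbL3, if_neg (by simp [hget])]
    · have hne := hno i le_rfl (by omega)
      rw [fbbL3, if_pos ⟨by omega, by simp [hne]⟩, if_neg (by simp [hne])]
      exact ih (i + 1) p (by omega) (by omega) hpn hget (fun j hj hj' => hno j (by omega) hj')

-- ===== VERDICT (by name: the statement is the Claim_ definition above) =====
theorem find_body_brace_spec : Claim_equal_find_body_brace := by
  intro content fn_start _ hpre
  unfold Pre_find_body_brace at hpre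
  unfold Spec_find_body_brace find_body_brace find_body_brace_alt
  simp only []
  by_cases hbig : pvN content < fn_start
  · rw [fbbFind_out content '(' fn_start hbig, if_pos rfl]
    rw [show (pvN content - fn_start).toNat = 0 by omega]
    rw [fbbL1, if_pos (by omega)]
  · have hn : fn_start ≤ pvN content := by omega
    by_cases hp : fbbFind content '(' fn_start = -1
    · rw [hp, if_pos rfl]
      have := fbbL1_none content _ fn_start rfl hn (fbbFind_neg_one content '(' fn_start hpre hn hp)
      rw [this, if_pos (le_refl _)]
    · rw [if_neg hp]
      obtain ⟨hip, hpn, hpget, hpmin⟩ := fbbFind_found content '(' fn_start hpre hn hp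
      set p := fbbFind content '(' fn_start with hp'
      have hL1 : fbbL1 content fn_start ((pvN content - fn_start).toNat) = p :=
        fbbL1_found content _ fn_start p rfl hip hpn hpget hpmin
      rw [hL1, if_neg (by omega)]
      have hstep : fbbL2 content p 0 ((pvN content - p).toNat)
          = fbbL2 content (p + 1) 1 ((pvN content - (p + 1)).toNat) := by
        have := fbbL2_step_open content p 0 hpn hpget
        simpa using this
      have hbridge := fbbClose_bridge content ((pvN content - (p + 1)).toNat) (p + 1) 1
        (by omega) (by omega) le_rfl le_rfl
      by_cases hj : fbbClose content (p + 1) 1 ((pvN content - (p + 1)).toNat) = -1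
      · rw [hj, if_pos rfl]
        have hL2 := hbridge.1 hj
        rw [hstep, hL2]
        rw [show (pvN content - pvN content).toNat = 0 by omega]
        rw [fbbL3]
        rw [if_pos (Or.inl (le_refl _))]
      · rw [if_neg hj]
        obtain ⟨hj0, hjn, hL2⟩ := hbridge.2 hj
        set j := fbbClose content (p + 1) 1 ((pvN content - (p + 1)).toNat) with hj'
        rw [hstep, hL2]
        by_cases hq : fbbFind content '{' j = -1
        · rw [hq]
          have := fbbL3_none content _ j rfl hjn (fbbFind_neg_one content '{' j hj0 hjn hq)
          rw [this, if_pos (Or.inl (le_refl _))]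
        · obtain ⟨hiq, hqn, hqget, hqmin⟩ := fbbFind_found content '{' j hj0 hjn hq
          set q := fbbFind content '{' j with hq'
          have := fbbL3_found content _ j q rfl hiq hqn hqget hqmin
          rw [this, if_neg (by push Not; exact ⟨by omega, hqget⟩)]
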